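-- pv_equiv track=rewrite | github.com/MaximeTarrago/Graph-theory | Alkanetraz-v2.py | mymethylindex
-- ===== SOURCE A (Python) =====
-- def mymethylindex(distancematrix, ncarb):
--     """
--     Calculates the methyl index by checking the relevant atoms in the distance matrix.
--     """
--
--     methylindex = 0
--     for i in range(ncarb):
--         flag = 0
--         for j in range(ncarb):
--             if distancematrix[i][j] == 1:
--                 memvar = j
--                 flag = flag + 1
--         if flag == 1:
--             flag = 0
--             for j in range(ncarb):
--                 if distancematrix[memvar][j] == 1:
--                     flag = flag + 1
--             if flag >= 3:
--                 methylindex = methylindex + 1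
--
--     return methylindex
-- ===== SOURCE B (Python) =====
-- def mymethylindex(distancematrix, ncarb):
--     """
--     Methyl index: count degree-1 carbons whose unique neighbor has degree >= 3.
--     Two-phase: build a (degree, last-neighbor) table once, then scan it with
--     table lookups instead of rescanning the neighbor's matrix row each time.
--     """
--     stats = []
--     for i in range(ncarb):
--         deg = 0
--         nbr = 0
--         for j in range(ncarb):
--             if distancematrix[i][j] == 1:
--                 deg += 1
--                 nbr = j
--         stats.append((deg, nbr))
--     return sum(1 for deg, nbr in stats if deg == 1 and stats[nbr][0] >= 3)
-- ===== Notes on version B (the rewrite author's own statement) =====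
-- stated objective: simpler
-- what changed: B tabulates each carbon's (degree, last neighbor) in one pass over the matrix and then counts degree-1 carbons whose neighbor's tabulated degree is >= 3, replacing A's inner rescan of the neighbor's matrix row with a table lookup.
import Mathlib
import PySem

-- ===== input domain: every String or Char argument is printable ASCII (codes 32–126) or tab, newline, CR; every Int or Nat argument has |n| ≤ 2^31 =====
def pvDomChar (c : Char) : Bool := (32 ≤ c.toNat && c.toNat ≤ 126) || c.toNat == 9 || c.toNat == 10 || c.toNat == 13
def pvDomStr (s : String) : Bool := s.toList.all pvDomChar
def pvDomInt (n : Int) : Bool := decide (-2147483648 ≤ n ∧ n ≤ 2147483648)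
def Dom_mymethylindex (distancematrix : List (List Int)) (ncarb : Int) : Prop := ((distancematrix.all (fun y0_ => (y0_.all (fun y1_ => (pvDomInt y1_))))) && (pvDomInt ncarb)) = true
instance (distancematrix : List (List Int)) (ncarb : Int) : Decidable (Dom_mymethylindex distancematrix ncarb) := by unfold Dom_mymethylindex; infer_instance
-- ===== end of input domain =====

-- B replaces A's per-carbon rescan of the neighbor's row with one precomputed
-- (degree, last-neighbor) table and a final scan of that table (objective: simpler).

-- shared access helper: distancematrix[i][j] (in range under Pre_)
def pvEntry (dm : List (List Int)) (i j : Int) : Int :=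
  PySem.List.pyGetD (PySem.List.pyGetD dm i []) j 0

-- ===== PORT A =====
def mymethylindex (distancematrix : List (List Int)) (ncarb : Int) : Int :=
  (PySem.List.pyRange 0 ncarb 1).foldl (fun methylindex i =>
    -- state (memvar, flag); memvar's initial value is only read when flag = 1,
    -- i.e. after at least one assignment, matching Python's uninitialised memvar
    let st := (PySem.List.pyRange 0 ncarb 1).foldl
      (fun (s : Int × Int) j => if pvEntry distancematrix i j = 1 then (j, s.2 + 1) else s)
      (0, 0)
    if st.2 = 1 then
      let flag2 := (PySem.List.pyRange 0 ncarb 1).foldl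
        (fun flag j => if pvEntry distancematrix st.1 j = 1 then flag + 1 else flag) (0 : Int)
      if flag2 ≥ 3 then methylindex + 1 else methylindex
    else methylindex) 0

-- ===== PORT B =====
def mymethylindex_alt (distancematrix : List (List Int)) (ncarb : Int) : Int :=
  let stats := (PySem.List.pyRange 0 ncarb 1).map (fun i =>
    (PySem.List.pyRange 0 ncarb 1).foldl
      (fun (s : Int × Int) j => if pvEntry distancematrix i j = 1 then (s.1 + 1, j) else s)
      (0, 0))
  stats.foldl (fun acc s =>
    if s.1 = 1 ∧ (PySem.List.pyGetD stats s.2 (0, 0)).1 ≥ 3 then acc + 1 else acc) 0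

-- ===== PRECONDITION & SPEC =====
-- Pre_ excludes exactly the inputs where Python A raises IndexError:
-- ncarb exceeding the number of rows, or a row among the first ncarb shorter than ncarb.
def Pre_mymethylindex (distancematrix : List (List Int)) (ncarb : Int) : Prop :=
  ncarb ≤ (distancematrix.length : Int) ∧
  ∀ row ∈ distancematrix.take ncarb.toNat, ncarb ≤ (row.length : Int)
instance (distancematrix : List (List Int)) (ncarb : Int) : Decidable (Pre_mymethylindex distancematrix ncarb) := by
  unfold Pre_mymethylindex; infer_instance

def pvWitness_mymethylindex : List (List Int) × Int :=
  ([[0, 1, 0, 0], [1, 0, 1, 1], [0, 1, 0, 0], [0, 1, 0, 0]], 4)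

def Spec_mymethylindex (distancematrix : List (List Int)) (ncarb : Int) (out : Int) : Prop := out = mymethylindex_alt distancematrix ncarb
instance (distancematrix : List (List Int)) (ncarb : Int) (out : Int) : Decidable (Spec_mymethylindex distancematrix ncarb out) := by unfold Spec_mymethylindex; infer_instance

-- ===== CLAIM (what is proved, stated in full; the proofs are below) =====
def Claim_equal_mymethylindex : Prop := ∀ (distancematrix : List (List Int)) (ncarb : Int), Dom_mymethylindex distancematrix ncarb → Pre_mymethylindex distancematrix ncarb → Spec_mymethylindex distancematrix ncarb (mymethylindex distancematrix ncarb)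

-- ===== LEMMAS AND PROOFS =====

-- B's per-row statistic (degree, last neighbor)
def rowStatB (dm : List (List Int)) (ncarb i : Int) : Int × Int :=
  (PySem.List.pyRange 0 ncarb 1).foldl
    (fun (s : Int × Int) j => if pvEntry dm i j = 1 then (s.1 + 1, j) else s) (0, 0)

-- A's inner fold is B's with the pair components swapped
theorem foldA_eq_swap (P : Int → Prop) [DecidablePred P] (l : List Int) (m f : Int) :
    l.foldl (fun (s : Int × Int) j => if P j then (j, s.2 + 1) else s) (m, f)
      = (((l.foldl (fun (s : Int × Int) j => if P j then (s.1 + 1, j) else s) (f, m)).2),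
         ((l.foldl (fun (s : Int × Int) j => if P j then (s.1 + 1, j) else s) (f, m)).1)) := by
  induction l generalizing m f with
  | nil => rfl
  | cons x xs ih =>
      by_cases h : P x <;> simp [List.foldl_cons, h, ih]

-- first component of B's fold equals the flag-only count fold
theorem foldB_fst (P : Int → Prop) [DecidablePred P] (l : List Int) (d n : Int) :
    (l.foldl (fun (s : Int × Int) j => if P j then (s.1 + 1, j) else s) (d, n)).1
      = l.foldl (fun f j => if P j then f + 1 else f) d := by
  induction l generalizing d n with
  | nil => rfl
  | cons x xs ih =>
      by_cases h : P x <;> simp [List.foldl_cons, h, ih]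

-- second component of B's fold is the initial one or a member of the list
theorem foldB_snd_mem (P : Int → Prop) [DecidablePred P] (l : List Int) (d n : Int) :
    (l.foldl (fun (s : Int × Int) j => if P j then (s.1 + 1, j) else s) (d, n)).2 = n ∨
    (l.foldl (fun (s : Int × Int) j => if P j then (s.1 + 1, j) else s) (d, n)).2 ∈ l := by
  induction l generalizing d n with
  | nil => left; rfl
  | cons x xs ih =>
      simp only [List.foldl_cons]
      by_cases h : P x
      · rw [if_pos h]
        rcases ih (d + 1) x with h' | h'
        · right; rw [h']; exact List.mem_cons_self
        · right; exact List.mem_cons_of_mem _ h'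
      · rw [if_neg h]
        rcases ih d n with h' | h'
        · left; exact h'
        · right; exact List.mem_cons_of_mem _ h'

-- the last-neighbor slot stays in [0, ncarb) when ncarb > 0
theorem rowStatB_snd_range (dm : List (List Int)) (ncarb i : Int) (hpos : 0 < ncarb) :
    0 ≤ (rowStatB dm ncarb i).2 ∧ (rowStatB dm ncarb i).2 < ncarb := by
  unfold rowStatB
  rcases foldB_snd_mem (fun j => pvEntry dm i j = 1) (PySem.List.pyRange 0 ncarb 1) 0 0 with h | h
  · rw [h]; exact ⟨le_refl 0, hpos⟩
  · rw [PySem.List.mem_pyRange_one] at h; exact h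

theorem mymethylindex_eq (distancematrix : List (List Int)) (ncarb : Int) :
    mymethylindex distancematrix ncarb = mymethylindex_alt distancematrix ncarb := by
  unfold mymethylindex mymethylindex_alt
  rw [List.foldl_map]
  apply PySem.List.foldl_congr_mem
  intro acc i hi
  rw [PySem.List.mem_pyRange_one] at hi
  have hpos : 0 < ncarb := lt_of_le_of_lt hi.1 hi.2
  simp only
  rw [foldA_eq_swap (fun j => pvEntry distancematrix i j = 1)]
  set st := (PySem.List.pyRange 0 ncarb 1).foldl
    (fun (s : Int × Int) j => if pvEntry distancematrix i j = 1 then (s.1 + 1, j) else s)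
    (0, 0) with hst
  have hrs : st = rowStatB distancematrix ncarb i := rfl
  have hdeg := foldB_fst (fun j => pvEntry distancematrix i j = 1)
      (PySem.List.pyRange 0 ncarb 1) 0 0
  by_cases h1 : st.1 = 1
  · have hrange := rowStatB_snd_range distancematrix ncarb i hpos
    rw [← hrs] at hrange
    rw [PySem.List.pyGetD_map_pyRange_of_nonneg _ ncarb st.2 _ hrange.1 hrange.2]
    have hlook : ((PySem.List.pyRange 0 ncarb 1).foldl
        (fun (s : Int × Int) j => if pvEntry distancematrix st.2 j = 1 then (s.1 + 1, j) else s)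
        (0, 0)).1
        = (PySem.List.pyRange 0 ncarb 1).foldl
          (fun f j => if pvEntry distancematrix st.2 j = 1 then f + 1 else f) 0 :=
      foldB_fst (fun j => pvEntry distancematrix st.2 j = 1) _ 0 0
    rw [hlook]
    simp [h1]
  · simp [h1]

-- ===== VERDICT (by name: the statement is the Claim_ definition above) =====
theorem mymethylindex_spec : Claim_equal_mymethylindex := by
  intro dm ncarb _ _
  exact mymethylindex_eq dm ncarb
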